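-- pv_equiv track=rewrite | github.com/ruvnet/agentXNG | dev/main.py | process_tool_calls
-- ===== SOURCE A (Python) =====
-- def process_tool_calls(response):
--     tool_calls = []
--     lines = response.split('\n')
--     current_tool = None
--     current_args = ""
--
--     for line in lines:
--         if line.startswith("Tool:"):
--             if current_tool:
--                 tool_calls.append({"name": current_tool, "arguments": current_args.strip()})
--             current_tool = line.split("Tool:")[1].strip()
--             current_args = ""
--         elif line.startswith("Arguments:"):
--             current_args += line.split("Arguments:")[1].strip() + "\n"
--         elif current_tool and line.strip():
--             current_args += line.strip() + "\n"
--
--     if current_tool: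
--         tool_calls.append({"name": current_tool, "arguments": current_args.strip()})
--
--     return tool_calls
-- ===== SOURCE B (Python) =====
-- def process_tool_calls(response):
--     # Two-phase: partition lines into blocks starting at "Tool:" headers, then render each block.
--     lines = response.split('\n')
--     n = len(lines)
--     i = 0
--     while i < n and not lines[i].startswith("Tool:"):
--         i += 1
--     result = []
--     while i < n:
--         name = lines[i].split("Tool:")[1].strip()
--         j = i + 1
--         while j < n and not lines[j].startswith("Tool:"):
--             j += 1
--         if name:
--             parts = []
--             for line in lines[i + 1:j]:
--                 if line.startswith("Arguments:"):
--                     parts.append(line.split("Arguments:")[1].strip() + "\n")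
--                 elif line.strip():
--                     parts.append(line.strip() + "\n")
--             result.append({"name": name, "arguments": "".join(parts).strip()})
--         i = j
--     return result
-- ===== Notes on version B (the rewrite author's own statement) =====
-- stated objective: alternative
-- what changed: A's single stateful scan (current_tool/current_args accumulators with flush-on-header and final flush) is replaced by a two-phase decomposition: partition the lines into blocks starting at tool-header lines, then render each named block's arguments independently.
import Mathlib
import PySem

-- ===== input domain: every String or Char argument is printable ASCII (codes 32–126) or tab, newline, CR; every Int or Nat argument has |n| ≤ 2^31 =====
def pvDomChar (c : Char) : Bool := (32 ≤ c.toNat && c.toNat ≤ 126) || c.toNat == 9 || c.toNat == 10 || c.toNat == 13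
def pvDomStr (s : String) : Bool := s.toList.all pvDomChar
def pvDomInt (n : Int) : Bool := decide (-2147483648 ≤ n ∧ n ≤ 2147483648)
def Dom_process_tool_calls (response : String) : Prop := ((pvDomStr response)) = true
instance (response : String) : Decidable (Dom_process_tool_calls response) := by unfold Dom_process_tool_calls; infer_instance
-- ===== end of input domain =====

-- B re-decomposes A's single stateful scan into two phases (partition the lines into "Tool:"
-- blocks, then render each block); objective: alternative decomposition, same asymptotic cost.

-- ===== PORT A =====
-- shared line-level primitives (both Pythons use these exact expressions)
-- line.split('\n'): sep "\n" ≠ "" so split? is always `some`; the getD [] never fires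
def pvLines (response : String) : List String := (PySem.Str.split? response "\n").getD []
-- line.split("Tool:")[1].strip(): under the startswith guard split? has ≥ 2 parts, so getD never fires
def pvToolName (line : String) : String :=
  PySem.Str.strip ((((PySem.Str.split? line "Tool:").getD []).getD 1 ""))
-- line.split("Arguments:")[1].strip(): same remark
def pvArgPart (line : String) : String :=
  PySem.Str.strip ((((PySem.Str.split? line "Arguments:").getD []).getD 1 ""))

-- Python truthiness of current_tool (None and "" are falsy)
def pvTruthy (t : Option String) : Bool := t.getD "" != ""
-- the dict literal {"name": …, "arguments": current_args.strip()}
def pvMkCall (name args : String) : List (String × String) :=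
  [("name", name), ("arguments", PySem.Str.strip args)]

-- the for-loop of A over lines, state = (tool_calls, current_tool, current_args)
def pvLoopA : List String → (List (List (String × String)) × Option String × String) →
    (List (List (String × String)) × Option String × String)
  | [], st => st
  | l :: ls, (acc, t, a) =>
    if PySem.Str.startswith l "Tool:" then
      pvLoopA ls ((if pvTruthy t then acc ++ [pvMkCall (t.getD "") a] else acc), some (pvToolName l), "")
    else if PySem.Str.startswith l "Arguments:" then
      pvLoopA ls (acc, t, a ++ pvArgPart l ++ "\n")
    else if pvTruthy t ∧ PySem.Str.strip l ≠ "" then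
      pvLoopA ls (acc, t, a ++ PySem.Str.strip l ++ "\n")
    else
      pvLoopA ls (acc, t, a)

-- the trailing "if current_tool: tool_calls.append(…)"
def pvFinishA (st : List (List (String × String)) × Option String × String) :
    List (List (String × String)) :=
  if pvTruthy st.2.1 then st.1 ++ [pvMkCall (st.2.1.getD "") st.2.2] else st.1

def process_tool_calls (response : String) : List (List (String × String)) :=
  pvFinishA (pvLoopA (pvLines response) ([], none, ""))

-- ===== PORT B =====
def pvNotTool (l : String) : Bool := !PySem.Str.startswith l "Tool:"

-- the parts-building for-loop of B over a block body
def pvRenderParts : List String → List String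
  | [] => []
  | l :: ls =>
    if PySem.Str.startswith l "Arguments:" then (pvArgPart l ++ "\n") :: pvRenderParts ls
    else if PySem.Str.strip l ≠ "" then (PySem.Str.strip l ++ "\n") :: pvRenderParts ls
    else pvRenderParts ls

-- the outer while-loop of B: each step consumes one "Tool:" header line and its body
-- (the inner `while j < n and not lines[j].startswith("Tool:")` is the takeWhile/dropWhile split)
def pvBlocksB : List String → List (List (String × String))
  | [] => []
  | l :: ls =>
    (if pvToolName l ≠ "" then
      [[("name", pvToolName l),
        ("arguments", PySem.Str.strip (PySem.Str.join "" (pvRenderParts (ls.takeWhile pvNotTool))))]]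
     else []) ++ pvBlocksB (ls.dropWhile pvNotTool)
  termination_by ls => ls.length
  decreasing_by simpa using Nat.lt_succ_of_le (List.length_dropWhile_le _ _)

def process_tool_calls_alt (response : String) : List (List (String × String)) :=
  pvBlocksB ((pvLines response).dropWhile pvNotTool)

-- ===== PRECONDITION & SPEC =====
def Spec_process_tool_calls (response : String) (out : List (List (String × String))) : Prop := out = process_tool_calls_alt response
instance (response : String) (out : List (List (String × String))) : Decidable (Spec_process_tool_calls response out) := by unfold Spec_process_tool_calls; infer_instance

-- ===== CLAIM (what is proved, stated in full; the proofs are below) =====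
def Claim_equal_process_tool_calls : Prop := ∀ (response : String), Dom_process_tool_calls response → Spec_process_tool_calls response (process_tool_calls response)

-- ===== LEMMAS AND PROOFS =====

theorem pvJoin_empty_nil : PySem.Str.join "" [] = "" := rfl

theorem pvJoin_empty_cons (p : String) (rest : List String) :
    PySem.Str.join "" (p :: rest) = p ++ PySem.Str.join "" rest := by
  cases rest with
  | nil =>
    apply String.toList_inj.mp
    simp [PySem.Str.toList_join, PySem.Chars.join_singleton, PySem.Chars.join_nil]
  | cons q r =>
    apply String.toList_inj.mp
    simp [PySem.Str.toList_join, PySem.Chars.join_cons_cons]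

theorem pvBlocksB_cons (l : String) (ls : List String) :
    pvBlocksB (l :: ls) =
      (if pvToolName l ≠ "" then
        [pvMkCall (pvToolName l) (PySem.Str.join "" (pvRenderParts (ls.takeWhile pvNotTool)))]
       else []) ++ pvBlocksB (ls.dropWhile pvNotTool) := by
  rw [pvBlocksB]; rfl

theorem pvTruthy_some (s : String) : pvTruthy (some s) = decide (s ≠ "") := by
  by_cases hs : s = "" <;> simp [pvTruthy, hs]

-- the core invariant: A's loop with an OPEN tool block (current_tool = some s) produces the
-- pending flush (dropped when s = "") followed by B's rendering of the remaining blocks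
theorem pvLoopA_open (ls : List String) : ∀ (acc : List (List (String × String))) (s a : String),
    pvFinishA (pvLoopA ls (acc, some s, a)) =
      acc ++ (if s ≠ "" then
                [pvMkCall s (a ++ PySem.Str.join "" (pvRenderParts (ls.takeWhile pvNotTool)))]
              else [])
          ++ pvBlocksB (ls.dropWhile pvNotTool) := by
  induction ls with
  | nil =>
    intro acc s a
    rw [show pvLoopA [] (acc, some s, a) = (acc, some s, a) from rfl]
    rw [show (List.takeWhile pvNotTool ([] : List String)) = [] from rfl,
        show (List.dropWhile pvNotTool ([] : List String)) = [] from rfl,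
        show pvRenderParts ([] : List String) = [] from rfl]
    rw [pvJoin_empty_nil, String.append_empty]
    unfold pvFinishA
    rw [pvTruthy_some]
    by_cases hs : s = "" <;> simp [hs, pvBlocksB]
  | cons l ls ih =>
    intro acc s a
    by_cases hT : PySem.Str.startswith l "Tool:" = true
    · have hnt : pvNotTool l = false := by rw [pvNotTool, hT]; rfl
      rw [show pvLoopA (l :: ls) (acc, some s, a)
            = pvLoopA ls ((if pvTruthy (some s) then acc ++ [pvMkCall ((some s).getD "") a] else acc),
                          some (pvToolName l), "") from by
            rw [pvLoopA]; rw [if_pos hT]]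
      rw [ih, List.takeWhile_cons_of_neg (by simp [hnt]), List.dropWhile_cons_of_neg (by simp [hnt])]
      rw [pvBlocksB_cons]
      rw [show pvRenderParts ([] : List String) = [] from rfl, pvJoin_empty_nil,
          String.append_empty, pvTruthy_some]
      by_cases hs : s = "" <;> simp [hs, String.empty_append, List.append_assoc]
    · have hTf : PySem.Str.startswith l "Tool:" = false := by
        revert hT; cases PySem.Str.startswith l "Tool:" <;> simp
      have hnt : pvNotTool l = true := by rw [pvNotTool, hTf]; rfl
      rw [List.takeWhile_cons_of_pos hnt, List.dropWhile_cons_of_pos hnt]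
      by_cases hA : PySem.Str.startswith l "Arguments:" = true
      · rw [show pvLoopA (l :: ls) (acc, some s, a)
              = pvLoopA ls (acc, some s, a ++ pvArgPart l ++ "\n") from by
            rw [pvLoopA]; rw [if_neg hT, if_pos hA]]
        rw [ih]
        rw [show pvRenderParts (l :: List.takeWhile pvNotTool ls)
              = (pvArgPart l ++ "\n") :: pvRenderParts (List.takeWhile pvNotTool ls) from by
            rw [pvRenderParts]; rw [if_pos hA]]
        rw [pvJoin_empty_cons]
        by_cases hs : s = "" <;> simp [hs, String.append_assoc]
      · by_cases hs' : PySem.Str.strip l = ""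
        · rw [show pvLoopA (l :: ls) (acc, some s, a) = pvLoopA ls (acc, some s, a) from by
              rw [pvLoopA]; rw [if_neg hT, if_neg hA, if_neg (by simp [hs'])]]
          rw [ih]
          rw [show pvRenderParts (l :: List.takeWhile pvNotTool ls)
                = pvRenderParts (List.takeWhile pvNotTool ls) from by
              rw [pvRenderParts]; rw [if_neg hA, if_neg (by simp [hs'])]]
        · by_cases hs : s = ""
          · rw [show pvLoopA (l :: ls) (acc, some s, a) = pvLoopA ls (acc, some s, a) from by
                rw [pvLoopA]; rw [if_neg hT, if_neg hA,
                  if_neg (by rw [pvTruthy_some]; simp [hs])]]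
            rw [ih]
            simp [hs]
          · rw [show pvLoopA (l :: ls) (acc, some s, a)
                  = pvLoopA ls (acc, some s, a ++ PySem.Str.strip l ++ "\n") from by
                rw [pvLoopA]; rw [if_neg hT, if_neg hA,
                  if_pos (by rw [pvTruthy_some]; simp [hs, hs'])]]
            rw [ih]
            rw [show pvRenderParts (l :: List.takeWhile pvNotTool ls)
                  = (PySem.Str.strip l ++ "\n") :: pvRenderParts (List.takeWhile pvNotTool ls) from by
                rw [pvRenderParts]; rw [if_neg hA, if_pos hs']]
            rw [pvJoin_empty_cons]
            simp [hs, String.append_assoc]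

-- before the first "Tool:" line, A's loop (current_tool = None) produces exactly B's blocks
theorem pvLoopA_closed (ls : List String) : ∀ (acc : List (List (String × String))) (a : String),
    pvFinishA (pvLoopA ls (acc, none, a)) = acc ++ pvBlocksB (ls.dropWhile pvNotTool) := by
  induction ls with
  | nil => intro acc a; simp [pvLoopA, pvFinishA, pvTruthy, pvBlocksB]
  | cons l ls ih =>
    intro acc a
    by_cases hT : PySem.Str.startswith l "Tool:" = true
    · have hnt : pvNotTool l = false := by rw [pvNotTool, hT]; rfl
      rw [show pvLoopA (l :: ls) (acc, none, a)
            = pvLoopA ls (acc, some (pvToolName l), "") from by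
          rw [pvLoopA]; rw [if_pos hT]; rfl]
      rw [pvLoopA_open, List.dropWhile_cons_of_neg (by simp [hnt]), pvBlocksB_cons]
      rw [show ("" : String) ++ PySem.Str.join "" (pvRenderParts (List.takeWhile pvNotTool ls))
            = PySem.Str.join "" (pvRenderParts (List.takeWhile pvNotTool ls)) from
          String.empty_append]
      simp
    · have hTf : PySem.Str.startswith l "Tool:" = false := by
        revert hT; cases PySem.Str.startswith l "Tool:" <;> simp
      have hnt : pvNotTool l = true := by rw [pvNotTool, hTf]; rfl
      rw [List.dropWhile_cons_of_pos hnt]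
      by_cases hA : PySem.Str.startswith l "Arguments:" = true
      · rw [show pvLoopA (l :: ls) (acc, none, a)
              = pvLoopA ls (acc, none, a ++ pvArgPart l ++ "\n") from by
            rw [pvLoopA]; rw [if_neg hT, if_pos hA]]
        rw [ih]
      · rw [show pvLoopA (l :: ls) (acc, none, a) = pvLoopA ls (acc, none, a) from by
            rw [pvLoopA]; rw [if_neg hT, if_neg hA, if_neg (by simp [pvTruthy])]]
        rw [ih]

-- ===== VERDICT (by name: the statement is the Claim_ definition above) =====
theorem process_tool_calls_spec : Claim_equal_process_tool_calls := by
  intro response _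
  show process_tool_calls response = process_tool_calls_alt response
  unfold process_tool_calls process_tool_calls_alt
  rw [pvLoopA_closed]
  simp
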